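-- pv_equiv track=rewrite | github.com/peipeijiang/open-storyline | FireRed-OpenStoryline/scripts/update_config.py | split_value_and_comment
-- ===== SOURCE A (Python) =====
-- def split_value_and_comment(text: str) -> tuple[str, str]:
--     quote: str | None = None
--     escape = False
--
--     for i, ch in enumerate(text):
--         if quote is not None:
--             if escape:
--                 escape = False
--             elif ch == "\\":
--                 escape = True
--             elif ch == quote:
--                 quote = None
--             continue
--
--         if ch in {'"', "'"}:
--             quote = ch
--         elif ch == "#":
--             return text[:i].rstrip(), text[i:]
--
--     return text.rstrip(), ""
-- ===== SOURCE B (Python) =====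
-- def split_value_and_comment(text: str) -> tuple[str, str]:
--     n = len(text)
--     i = 0
--     while i < n:
--         ch = text[i]
--         if ch in ('"', "'"):
--             # quoted span: advance past it (or to end if unterminated)
--             i += 1
--             while i < n:
--                 if text[i] == "\\":
--                     i += 2
--                 elif text[i] == ch:
--                     i += 1
--                     break
--                 else:
--                     i += 1
--         elif ch == "#":
--             return text[:i].rstrip(), text[i:]
--         else:
--             i += 1
--     return text.rstrip(), ""
-- ===== Notes on version B (the rewrite author's own statement) =====
-- stated objective: alternative
-- what changed: Replaced A's single for-loop with persistent quote/escape boolean state by an index-based outer loop plus a dedicated inner loop that consumes each quoted span (a backslash skips two characters), encoding the state in control flow instead of mutable flags.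
import Mathlib
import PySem

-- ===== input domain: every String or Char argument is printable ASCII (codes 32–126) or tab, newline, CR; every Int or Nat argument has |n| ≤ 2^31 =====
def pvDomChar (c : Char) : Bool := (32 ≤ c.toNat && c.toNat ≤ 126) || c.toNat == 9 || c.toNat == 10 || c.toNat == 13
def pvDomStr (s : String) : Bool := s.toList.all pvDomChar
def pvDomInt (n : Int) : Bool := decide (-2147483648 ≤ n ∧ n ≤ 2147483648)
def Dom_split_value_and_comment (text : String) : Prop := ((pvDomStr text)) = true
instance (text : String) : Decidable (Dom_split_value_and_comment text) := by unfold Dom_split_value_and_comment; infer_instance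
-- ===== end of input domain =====

-- B re-decomposes A's flag-driven scan (persistent quote/escape state) into an index-based
-- outer loop with an inner loop over each quoted span; same return value, no speed claim.

-- ===== PORT A =====
-- A's for-loop over enumerate(text) with state (quote, escape); returns the index of the
-- first unquoted '#', or none if the loop finishes.
def aLoop : List Char → Nat → Option Char → Bool → Option Nat
  | [], _, _, _ => none
  | ch :: rest, i, some q, escape =>
    if escape then aLoop rest (i + 1) (some q) false
    else if ch = '\\' then aLoop rest (i + 1) (some q) true
    else if ch = q then aLoop rest (i + 1) none false
    else aLoop rest (i + 1) (some q) false
  | ch :: rest, i, none, escape =>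
    if ch = '"' ∨ ch = '\'' then aLoop rest (i + 1) (some ch) escape
    else if ch = '#' then some i
    else aLoop rest (i + 1) none escape

def split_value_and_comment (text : String) : String × String :=
  match aLoop text.toList 0 none false with
  | some i => (PySem.Str.rstrip (PySem.Str.slice text none (some (i : Int))),
               PySem.Str.slice text (some (i : Int)) none)
  | none => (PySem.Str.rstrip text, "")

-- ===== PORT B =====
-- B's inner while-loop: starting just after an opening quote q, advance through the quoted
-- span (a backslash skips two chars, even past the end); returns the remaining characters
-- and the index just after the closing quote (or ([], past-end) if unterminated).
def bQuote : List Char → Nat → Char → List Char × Nat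
  | [], j, _ => ([], j)
  | c :: rest, j, q =>
    if c = '\\' then
      match rest with
      | [] => ([], j + 2)
      | _ :: rest2 => bQuote rest2 (j + 2) q
    else if c = q then (rest, j + 1)
    else bQuote rest (j + 1) q

theorem bQuote_len : ∀ (cs : List Char) (j : Nat) (q : Char), (bQuote cs j q).1.length ≤ cs.length := by
  intro cs j q
  induction cs, j, q using bQuote.induct with
  | case1 j q => simp [bQuote]
  | case2 j q => simp [bQuote]
  | case3 j q head rest2 ih => simp [bQuote]; exact ih.trans (by omega)
  | case4 rest j q h => unfold bQuote; simp [h]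
  | case5 c rest j q h1 h2 ih => unfold bQuote; simp [h1, h2]; exact ih.trans (by omega)

-- B's outer while-loop over positions.
def bLoop : List Char → Nat → Option Nat
  | [], _ => none
  | c :: rest, i =>
    if c = '"' ∨ c = '\'' then
      bLoop (bQuote rest (i + 1) c).1 (bQuote rest (i + 1) c).2
    else if c = '#' then some i
    else bLoop rest (i + 1)
termination_by cs _ => cs.length
decreasing_by
  · exact Nat.lt_succ_of_le (bQuote_len rest (i + 1) c)
  · simp

def split_value_and_comment_alt (text : String) : String × String :=
  match bLoop text.toList 0 with
  | some i => (PySem.Str.rstrip (PySem.Str.slice text none (some (i : Int))),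
               PySem.Str.slice text (some (i : Int)) none)
  | none => (PySem.Str.rstrip text, "")

-- ===== PRECONDITION & SPEC =====
def Spec_split_value_and_comment (text : String) (out : String × String) : Prop := out = split_value_and_comment_alt text
instance (text : String) (out : String × String) : Decidable (Spec_split_value_and_comment text out) := by unfold Spec_split_value_and_comment; infer_instance

-- ===== CLAIM (what is proved, stated in full; the proofs are below) =====
def Claim_equal_split_value_and_comment : Prop := ∀ (text : String), Dom_split_value_and_comment text → Spec_split_value_and_comment text (split_value_and_comment text)

-- ===== LEMMAS AND PROOFS =====

-- A inside a quote (escape clear) scans exactly the span B's inner loop consumes,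
-- then continues as an unquoted scan from where bQuote left off.
theorem aLoop_quote : ∀ (cs : List Char) (j : Nat) (q : Char),
    aLoop cs j (some q) false = aLoop (bQuote cs j q).1 (bQuote cs j q).2 none false := by
  intro cs j q
  induction cs, j, q using bQuote.induct with
  | case1 j q => simp [bQuote, aLoop]
  | case2 j q => simp [bQuote, aLoop]
  | case3 j q head rest2 ih => simpa [aLoop, bQuote] using ih
  | case4 rest j q h =>
    have hb : bQuote (q :: rest) j q = (rest, j + 1) := by unfold bQuote; simp [h]
    rw [hb]; simp [aLoop, h]
  | case5 c rest j q h1 h2 ih =>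
    have hb : bQuote (c :: rest) j q = bQuote rest (j + 1) q := by
      unfold bQuote; simp [h1, h2]; exact bQuote.eq_def rest (j + 1) q
    rw [hb]; simpa [aLoop, h1, h2] using ih

theorem aLoop_eq_bLoop : ∀ (cs : List Char) (i : Nat), aLoop cs i none false = bLoop cs i := by
  intro cs i
  induction cs, i using bLoop.induct with
  | case1 i => simp [aLoop, bLoop]
  | case2 c rest i h ih =>
    rw [bLoop, if_pos h, ← ih, ← aLoop_quote]
    simp [aLoop, h]
  | case3 rest i h => simp [aLoop, bLoop]
  | case4 c rest i h hh ih =>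
    rw [bLoop, if_neg h, if_neg hh, ← ih]
    simp [aLoop, h, hh]

-- ===== VERDICT (by name: the statement is the Claim_ definition above) =====
theorem split_value_and_comment_spec : Claim_equal_split_value_and_comment := by
  intro text _
  unfold Spec_split_value_and_comment split_value_and_comment split_value_and_comment_alt
  rw [aLoop_eq_bLoop]
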